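-- pv_equiv track=rewrite | github.com/joshlomas99/Advent-of-Code-2022 | Day20.py | mixing
-- ===== SOURCE A (Python) =====
-- def mixing(values: list, rounds: int=1) -> list:
--     """
--     Apply a mixing procedure to a list of numbers, whereby each number is moved forward or backward
--     in the list a number of positions equal to the value of the number being moved. The list is
--     circular, so moving a number off one end of the list wraps back around to the other end as if
--     the ends were connected. The numbers are moved in the order they originally appear in the list.
--
--     Parameters
--     ----------
--     values : list
--         The list of values to mix.
--     rounds : int, optional
--         The number of times the mixing procedure should be applied to the list from start to finish,
--         although the order in which the numbers are mixed does not change between rounds.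
--         The default is 1.
--
--     Returns
--     -------
--     new_values : list
--         The list of values after mixing.
--
--     """
--     # Create list of the original positions of values
--     positions = list(range(len(values)))
--     # For each round
--     for i in range(rounds):
--         # For each initial position, in order
--         for pos in range(len(values)):
--             # Find the current position of that value
--             curr_pos = positions.index(pos)
--             # Apply mixing to find the new position of the value
--             new_pos = (curr_pos + values[pos] - 1)%(len(values) - 1) + 1
--             # Rebuild the list, removing the value from its current positions and inserting it in
--             # the new position
--             if new_pos > curr_pos:
--                 positions = positions[:curr_pos] + positions[curr_pos+1: new_pos+1] + [pos] + positions[new_pos+1:]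
--             elif new_pos < curr_pos:
--                 positions = positions[:new_pos] + [pos] + positions[new_pos:curr_pos] + positions[curr_pos+1:]
--
--     # Rerieve the values corresponding to each initial position
--     new_values = [values[p] for p in positions]
--
--     return new_values
-- ===== SOURCE B (Python) =====
-- def mixing(values: list, rounds: int = 1) -> list:
--     """Alternative mixing: instead of keeping the list of original indices in
--     current order (and rescanning it with .index and rebuilding it from slices),
--     maintain the INVERSE permutation `where`, with where[p] = current position of
--     the value originally at index p.  Moving one value is a pointwise arithmetic
--     shift of the affected positions; the output is built by scattering each value
--     to its final position."""
--     n = len(values)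
--     where = list(range(n))
--     for _ in range(rounds):
--         for p in range(n):
--             c = where[p]
--             t = (c + values[p] - 1) % (n - 1) + 1
--             if t > c:
--                 where = [w - 1 if c < w <= t else w for w in where]
--             elif t < c:
--                 where = [w + 1 if t <= w < c else w for w in where]
--             where[p] = t
--     out = [0] * n
--     for p in range(n):
--         out[where[p]] = values[p]
--     return out
-- ===== Notes on version B (the rewrite author's own statement) =====
-- stated objective: alternative
-- what changed: A keeps the list of original indices in current order, rescans it with list.index for every move and rebuilds it from four slices with a three-way branch; B instead maintains the inverse permutation (current position of each original index), performs each move as a pointwise arithmetic shift of the affected positions with no index scan and no list surgery, and builds the output by scattering each value to its final position.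
import Mathlib
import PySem

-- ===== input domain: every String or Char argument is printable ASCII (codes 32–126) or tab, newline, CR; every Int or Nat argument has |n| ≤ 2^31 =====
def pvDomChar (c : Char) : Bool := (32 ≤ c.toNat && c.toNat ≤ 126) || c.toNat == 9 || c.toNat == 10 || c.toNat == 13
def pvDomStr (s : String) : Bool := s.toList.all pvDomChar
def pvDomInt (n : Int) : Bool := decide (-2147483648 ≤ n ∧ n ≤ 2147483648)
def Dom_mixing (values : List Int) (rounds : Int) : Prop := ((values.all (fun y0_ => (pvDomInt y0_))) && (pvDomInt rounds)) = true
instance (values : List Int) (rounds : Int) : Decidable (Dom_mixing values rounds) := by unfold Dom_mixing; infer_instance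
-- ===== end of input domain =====

-- B re-implements A's list mixing with the inverse permutation (position of each element)
-- updated by arithmetic shifts and a final scatter, instead of A's repeated list.index scans
-- and four-slice rebuilds; same cost class, different algorithmic structure (objective: alternative).

-- ===== PORT A =====
-- one mixing move of A: find the value's position with .index, recompute it, rebuild the
-- list from four slices with a three-way branch
-- (.index never misses: `pos` is always present in `positions`, so `.getD 0` is never used — exact;
--  values[pos] with pos from range(len(values)) is always in range, so pyGetD's default is never used — exact)
def stepA (values : List Int) (positions : List Int) (pos : Int) : List Int :=
  let curr_pos : Int := ((PySem.List.index? positions pos).getD 0 : Nat)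
  let new_pos : Int :=
    PySem.Int.mod (curr_pos + PySem.List.pyGetD values pos 0 - 1) ((values.length : Int) - 1) + 1
  if new_pos > curr_pos then
    PySem.List.slice positions none (some curr_pos) ++
      (PySem.List.slice positions (some (curr_pos + 1)) (some (new_pos + 1)) ++
        ([pos] ++ PySem.List.slice positions (some (new_pos + 1)) none))
  else if new_pos < curr_pos then
    PySem.List.slice positions none (some new_pos) ++
      ([pos] ++ (PySem.List.slice positions (some new_pos) (some curr_pos) ++
        PySem.List.slice positions (some (curr_pos + 1)) none))
  else positions

def mixing (values : List Int) (rounds : Int) : List Int :=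
  let positions :=
    (PySem.List.pyRange 0 rounds 1).foldl
      (fun positions _i =>
        (PySem.List.pyRange 0 (values.length : Int) 1).foldl (stepA values) positions)
      (PySem.List.pyRange 0 (values.length : Int) 1)
  positions.map (fun p => PySem.List.pyGetD values p 0)

-- ===== PORT B =====
-- one mixing move of B: read the value's position from the inverse permutation `w`,
-- shift the displaced positions arithmetically, store the new position
-- (where[p] = t with 0 ≤ p < len(w): List.set is exact there; pyGetD's defaults are never used)
def stepB (values : List Int) (w : List Int) (p : Nat) : List Int :=
  let c := PySem.List.pyGetD w (p : Int) 0
  let t : Int :=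
    PySem.Int.mod (c + PySem.List.pyGetD values (p : Int) 0 - 1) ((values.length : Int) - 1) + 1
  let w' := if t > c then w.map (fun x => if c < x ∧ x ≤ t then x - 1 else x)
            else if t < c then w.map (fun x => if t ≤ x ∧ x < c then x + 1 else x)
            else w
  w'.set p t

def mixing_alt (values : List Int) (rounds : Int) : List Int :=
  let n := values.length
  let w :=
    (PySem.List.pyRange 0 rounds 1).foldl
      (fun w _i => (List.range n).foldl (stepB values) w)
      (PySem.List.pyRange 0 (n : Int) 1)
  -- out[where[p]] = values[p]: where[p] is always in [0, n), so .toNat / List.set are exact there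
  (List.range n).foldl
    (fun (out : List Int) (p : Nat) =>
      out.set (PySem.List.pyGetD w ((p : Nat) : Int) 0).toNat (PySem.List.pyGetD values ((p : Nat) : Int) 0))
    (List.replicate n 0)

-- ===== PRECONDITION & SPEC =====
-- Pre_ excludes only singleton lists mixed at least once: there Python's `% (len(values) - 1)`
-- divides by zero and A raises ZeroDivisionError (B raises the same ZeroDivisionError).
def Pre_mixing (values : List Int) (rounds : Int) : Prop := ¬(values.length = 1 ∧ 1 ≤ rounds)
instance (values : List Int) (rounds : Int) : Decidable (Pre_mixing values rounds) := by
  unfold Pre_mixing; infer_instance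
def pvWitness_mixing : List Int × Int := ([1, -2, 0, 4], 2)

def Spec_mixing (values : List Int) (rounds : Int) (out : List Int) : Prop := out = mixing_alt values rounds
instance (values : List Int) (rounds : Int) (out : List Int) : Decidable (Spec_mixing values rounds out) := by unfold Spec_mixing; infer_instance

-- ===== CLAIM (what is proved, stated in full; the proofs are below) =====
def Claim_equal_mixing : Prop := ∀ (values : List Int) (rounds : Int), Dom_mixing values rounds → Pre_mixing values rounds → Spec_mixing values rounds (mixing values rounds)

-- ===== LEMMAS AND PROOFS =====

-- the reference arrangement: positions 0..n-1 in order
-- pvInv: the inverse permutation of an arrangement L (current index of each original index p)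
-- pvMv: the abstract form of one mixing move — remove at c, re-insert at t
def pvR (n : Nat) : List Int := PySem.List.pyRange 0 (n : Int) 1
def pvInv (n : Nat) (L : List Int) : List Int :=
  (List.range n).map (fun (p : Nat) => ((L.idxOf ((p : Nat) : Int) : Nat) : Int))
def pvMv (L : List Int) (c t : Nat) (p : Int) : List Int := (L.eraseIdx c).insertIdx t p

theorem pv_insertIdx_take_drop (l : List Int) (x : Int) (i : Nat) (h : i ≤ l.length) :
    l.insertIdx i x = l.take i ++ x :: l.drop i := by
  induction l generalizing i with
  | nil => simp at h; simp [h]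
  | cons a t ih => cases i with
    | zero => simp
    | succ j => simp [List.insertIdx_succ_cons, ih j (by simpa using h)]

theorem pvR_length (n : Nat) : (pvR n).length = n := by
  simp [pvR, PySem.List.length_pyRange_one]
theorem pvR_nodup (n : Nat) : (pvR n).Nodup := PySem.List.nodup_pyRange_one 0 _
theorem pvR_mem (n : Nat) (x : Int) : x ∈ pvR n ↔ 0 ≤ x ∧ x < n := by
  simp [pvR, PySem.List.mem_pyRange_one]
theorem pvR_getElem (n k : Nat) (h : k < (pvR n).length) : (pvR n)[k] = (k : Int) := by
  simp [pvR, PySem.List.getElem_pyRange_one]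

theorem pv_perm_length {n : Nat} {L : List Int} (h : L.Perm (pvR n)) : L.length = n := by
  rw [h.length_eq, pvR_length]
theorem pv_perm_nodup {n : Nat} {L : List Int} (h : L.Perm (pvR n)) : L.Nodup :=
  (pvR_nodup n).perm h.symm
theorem pv_perm_mem {n : Nat} {L : List Int} (h : L.Perm (pvR n)) (x : Int) :
    x ∈ L ↔ 0 ≤ x ∧ x < n := by
  rw [h.mem_iff, pvR_mem]

theorem pv_idxOf_lt {n : Nat} {L : List Int} (h : L.Perm (pvR n)) {p : Nat} (hp : p < n) :
    L.idxOf (p : Int) < n := by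
  rw [← pv_perm_length h]
  exact List.idxOf_lt_length_of_mem ((pv_perm_mem h _).mpr ⟨Int.natCast_nonneg p, by exact_mod_cast hp⟩)

theorem pv_getElem_idxOf {n : Nat} {L : List Int} (h : L.Perm (pvR n)) {p : Nat} (hp : p < n) :
    L[L.idxOf (p : Int)]'(by rw [pv_perm_length h]; exact pv_idxOf_lt h hp) = (p : Int) :=
  List.getElem_idxOf (by rw [pv_perm_length h]; exact pv_idxOf_lt h hp)

theorem pv_index?_getD {L : List Int} (x : Int) (h : x ∈ L) :
    (PySem.List.index? L x).getD 0 = L.idxOf x := by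
  rw [PySem.List.index?_eq_idxOf?]
  have h1 : (L.idxOf? x).isSome := by simpa [List.isSome_idxOf?] using h
  rcases Option.isSome_iff_exists.mp h1 with ⟨i, hi⟩
  have := List.idxOf_eq_getD_idxOf? x L
  rw [hi] at this ⊢; simp at this; simp [this]

theorem pv_mv_perm {n : Nat} {L : List Int} (h : L.Perm (pvR n)) {p : Nat} (hp : p < n)
    {t : Nat} (ht : t ≤ n - 1) : (pvMv L (L.idxOf (p : Int)) t (p : Int)).Perm (pvR n) := by
  have hc : L.idxOf (p : Int) < L.length := by rw [pv_perm_length h]; exact pv_idxOf_lt h hp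
  have h1 : L.Perm ((p : Int) :: L.eraseIdx (L.idxOf (p : Int))) := by
    have := (List.getElem_cons_eraseIdx_perm hc).symm
    rwa [pv_getElem_idxOf h hp] at this
  have hlen : (L.eraseIdx (L.idxOf (p : Int))).length = n - 1 := by
    rw [List.length_eraseIdx, if_pos hc, pv_perm_length h]
  have h2 := List.perm_insertIdx (p : Int) (L.eraseIdx (L.idxOf (p : Int))) (i := t) (by omega)
  exact (h2.trans h1.symm).trans h

theorem pv_insert_erase_perm (L : List Int) (x : Int) (c t : Nat)
    (hc : c < L.length) (hx : L[c] = x) (ht : t ≤ L.length - 1) :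
    ((L.eraseIdx c).insertIdx t x).Perm L := by
  have hMlen : (L.eraseIdx c).length = L.length - 1 := by
    rw [List.length_eraseIdx, if_pos hc]
  have h1 : L.Perm (x :: L.eraseIdx c) := by
    have := (List.getElem_cons_eraseIdx_perm hc).symm
    rwa [hx] at this
  exact (List.perm_insertIdx x _ (by omega)).trans h1.symm

theorem pv_idxOf_insert_erase_self (L : List Int) (x : Int) (c t : Nat)
    (hnd : L.Nodup) (hc : c < L.length) (hx : L[c] = x) (ht : t ≤ L.length - 1) (hn : 1 ≤ L.length) :
    ((L.eraseIdx c).insertIdx t x).idxOf x = t := by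
  have hperm := pv_insert_erase_perm L x c t hc hx ht
  have hlen : ((L.eraseIdx c).insertIdx t x).length = L.length := hperm.length_eq
  have hnd' : ((L.eraseIdx c).insertIdx t x).Nodup := hnd.perm hperm.symm
  have hval : ((L.eraseIdx c).insertIdx t x)[t]'(by omega) = x := by
    rw [List.getElem_insertIdx]
    simp
  have h2 := hnd'.idxOf_getElem t (by omega)
  rw [hval] at h2
  exact h2

theorem pv_idxOf_insert_erase (L : List Int) (x : Int) (c t j : Nat)
    (hnd : L.Nodup) (hc : c < L.length) (hx : L[c] = x) (ht : t ≤ L.length - 1)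
    (hj : j < L.length) (hjc : j ≠ c) :
    ((L.eraseIdx c).insertIdx t x).idxOf (L[j]) =
      if c < j ∧ j ≤ t then j - 1 else if t ≤ j ∧ j < c then j + 1 else j := by
  have hperm := pv_insert_erase_perm L x c t hc hx ht
  have hlen : ((L.eraseIdx c).insertIdx t x).length = L.length := hperm.length_eq
  have hnd' : ((L.eraseIdx c).insertIdx t x).Nodup := hnd.perm hperm.symm
  have hMlen : (L.eraseIdx c).length = L.length - 1 := by
    rw [List.length_eraseIdx, if_pos hc]
  have key : ∀ (i : Nat) (hi : i < ((L.eraseIdx c).insertIdx t x).length),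
      ((L.eraseIdx c).insertIdx t x)[i] = L[j] →
      ((L.eraseIdx c).insertIdx t x).idxOf (L[j]) = i := by
    intro i hi hv
    have h2 := hnd'.idxOf_getElem i hi
    rw [hv] at h2
    exact h2
  by_cases h1 : c < j ∧ j ≤ t
  · rw [if_pos h1]
    cases j with
    | zero => omega
    | succ i =>
      simp only [Nat.add_sub_cancel]
      apply key i (by omega)
      rw [List.getElem_insertIdx, dif_pos (by omega), List.getElem_eraseIdx, dif_neg (by omega)]
  · by_cases h2 : t ≤ j ∧ j < c
    · rw [if_neg h1, if_pos h2]
      apply key (j + 1) (by omega)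
      rw [List.getElem_insertIdx, dif_neg (by omega), dif_neg (by omega)]
      simp only [Nat.add_sub_cancel]
      rw [List.getElem_eraseIdx, dif_pos (by omega)]
    · rw [if_neg h1, if_neg h2]
      rcases Nat.lt_or_ge j c with hlt | hge
      · have hjt : j < t := by omega
        apply key j (by omega)
        rw [List.getElem_insertIdx, dif_pos (by omega), List.getElem_eraseIdx, dif_pos (by omega)]
      · have hcj : c < j := by omega
        have hjt : t < j := by omega
        cases j with
        | zero => omega
        | succ i =>
          apply key (i + 1) (by omega)
          rw [List.getElem_insertIdx, dif_neg (by omega), dif_neg (by omega)]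
          simp only [Nat.add_sub_cancel]
          rw [List.getElem_eraseIdx, dif_neg (by omega)]

theorem pv_idxOf_mv_self {n : Nat} {L : List Int} (h : L.Perm (pvR n)) {p : Nat} (hp : p < n)
    {t : Nat} (ht : t ≤ n - 1) :
    (pvMv L (L.idxOf (p : Int)) t (p : Int)).idxOf (p : Int) = t := by
  have hLlen := pv_perm_length h
  have hc : L.idxOf (p : Int) < n := pv_idxOf_lt h hp
  exact pv_idxOf_insert_erase_self L (p : Int) _ t (pv_perm_nodup h) (by omega)
    (pv_getElem_idxOf h hp) (by omega) (by omega)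

theorem pv_idxOf_mv_other {n : Nat} {L : List Int} (h : L.Perm (pvR n)) {p : Nat} (hp : p < n)
    {t : Nat} (ht : t ≤ n - 1) {q : Nat} (hq : q < n) (hqp : q ≠ p) :
    (pvMv L (L.idxOf (p : Int)) t (p : Int)).idxOf (q : Int) =
      (if L.idxOf (p : Int) < L.idxOf (q : Int) ∧ L.idxOf (q : Int) ≤ t then L.idxOf (q : Int) - 1
       else if t ≤ L.idxOf (q : Int) ∧ L.idxOf (q : Int) < L.idxOf (p : Int) then L.idxOf (q : Int) + 1
       else L.idxOf (q : Int)) := by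
  have hLlen := pv_perm_length h
  have hc : L.idxOf (p : Int) < n := pv_idxOf_lt h hp
  have hj : L.idxOf (q : Int) < n := pv_idxOf_lt h hq
  have hLj : L[L.idxOf (q : Int)]'(by omega) = (q : Int) := pv_getElem_idxOf h hq
  have hjc : L.idxOf (q : Int) ≠ L.idxOf (p : Int) := by
    intro hh
    have hLc : L[L.idxOf (p : Int)]'(by omega) = (p : Int) := pv_getElem_idxOf h hp
    have h1 : L.getD (L.idxOf (q : Int)) 0 = (q : Int) := by
      rw [List.getD_eq_getElem L 0 (by omega)]; exact hLj
    have h2 : L.getD (L.idxOf (p : Int)) 0 = (p : Int) := by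
      rw [List.getD_eq_getElem L 0 (by omega)]; exact hLc
    rw [hh, h2] at h1
    exact hqp (by exact_mod_cast h1.symm)
  have := pv_idxOf_insert_erase L (p : Int) (L.idxOf (p : Int)) t (L.idxOf (q : Int))
    (pv_perm_nodup h) (by omega) (pv_getElem_idxOf h hp) (by omega) (by omega) hjc
  rw [hLj] at this
  exact this

-- the target position computed by both programs, and its bounds
def pvT (values : List Int) (c : Int) (p : Nat) : Int :=
  PySem.Int.mod (c + PySem.List.pyGetD values (p : Int) 0 - 1) ((values.length : Int) - 1) + 1

theorem pvT_bounds (values : List Int) (c : Int) (p : Nat) (h : 2 ≤ values.length) :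
    1 ≤ pvT values c p ∧ pvT values c p ≤ (values.length : Int) - 1 := by
  unfold pvT
  have hb : (0 : Int) < (values.length : Int) - 1 := by
    have : (2 : Int) ≤ (values.length : Int) := by exact_mod_cast h
    omega
  constructor
  · have := PySem.Int.mod_nonneg (c + PySem.List.pyGetD values (p : Int) 0 - 1) hb
    omega
  · have := PySem.Int.mod_lt (c + PySem.List.pyGetD values (p : Int) 0 - 1) hb
    omega

theorem pv_stepA_eq_mv (values : List Int) {n : Nat} (hn : n = values.length) (h2 : 2 ≤ n)
    {L : List Int} (h : L.Perm (pvR n)) {p : Nat} (hp : p < n) :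
    stepA values L (p : Int) =
      pvMv L (L.idxOf (p : Int)) (pvT values ((L.idxOf (p : Int) : Nat) : Int) p).toNat (p : Int) := by
  have hLlen := pv_perm_length h
  have hmem : (p : Int) ∈ L := (pv_perm_mem h _).mpr ⟨Int.natCast_nonneg p, by exact_mod_cast hp⟩
  have hidx : (PySem.List.index? L (p : Int)).getD 0 = L.idxOf (p : Int) := pv_index?_getD _ hmem
  set c := L.idxOf (p : Int) with hcdef
  have hc : c < n := pv_idxOf_lt h hp
  have hT := pvT_bounds values ((c : Nat) : Int) p (hn ▸ h2)
  set ti := pvT values ((c : Nat) : Int) p with htidef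
  set tN := ti.toNat with htNdef
  have htN : (tN : Int) = ti := by omega
  have htle : tN ≤ n - 1 := by
    have : ti ≤ (values.length : Int) - 1 := hT.2
    rw [← hn] at this
    omega
  have ht1 : 1 ≤ tN := by omega
  have hMeq : L.eraseIdx c = L.take c ++ L.drop (c + 1) := List.eraseIdx_eq_take_drop_succ L c
  have hMlen : (L.eraseIdx c).length = n - 1 := by
    rw [List.length_eraseIdx, if_pos (by omega), hLlen]
  have hIns : pvMv L c tN (p : Int) =
      (L.eraseIdx c).take tN ++ (p : Int) :: (L.eraseIdx c).drop tN :=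
    pv_insertIdx_take_drop _ _ _ (by omega)
  have htake : (L.take c).length = c := by
    rw [List.length_take]; omega
  simp only [stepA, hidx]
  have hti' : PySem.Int.mod ((c : Int) + PySem.List.pyGetD values (p : Int) 0 - 1) ((values.length : Int) - 1) + 1 = (tN : Int) := by
    rw [htN, htidef, pvT]
  rw [hti']
  clear_value tN ti c
  have hc1 : ((c : Int) + 1) = (((c + 1 : Nat)) : Int) := by push_cast; ring
  have ht1' : ((tN : Int) + 1) = (((tN + 1 : Nat)) : Int) := by push_cast; ring
  rcases Nat.lt_trichotomy c tN with hlt | heq | hgt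
  · rw [if_pos (by exact_mod_cast hlt)]
    rw [hc1, ht1', PySem.List.slice_to_natCast, PySem.List.slice_natCast, PySem.List.slice_from_natCast]
    rw [hIns, hMeq]
    rw [List.take_append, List.drop_append, htake]
    rw [List.take_take, Nat.min_eq_right (Nat.le_of_lt hlt)]
    rw [List.drop_eq_nil_of_le (as := List.take c L) (i := tN) (by rw [htake]; omega)]
    rw [List.drop_drop]
    rw [show c + 1 + (tN - c) = tN + 1 from by omega, show tN + 1 - (c + 1) = tN - c from by omega]
    simp
  · rw [if_neg (by omega), if_neg (by omega)]
    have hgc : L[c]'(by omega) = (p : Int) := by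
      simp only [hcdef]
      exact pv_getElem_idxOf h hp
    have := List.insertIdx_eraseIdx_getElem (l := L) (n := c) (by omega)
    rw [hgc] at this
    rw [pvMv, ← heq, this]
  · rw [if_neg (by omega), if_pos (by exact_mod_cast hgt)]
    rw [hc1, PySem.List.slice_to_natCast, PySem.List.slice_natCast, PySem.List.slice_from_natCast]
    rw [hIns, hMeq]
    rw [List.take_append, List.drop_append, htake]
    rw [List.take_take, Nat.min_eq_left (Nat.le_of_lt hgt), show tN - c = 0 from by omega]
    rw [List.drop_take]
    simp


theorem pv_inv_length (n : Nat) (L : List Int) : (pvInv n L).length = n := by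
  simp [pvInv]

theorem pv_inv_getD (n : Nat) (L : List Int) {p : Nat} (hp : p < n) :
    (pvInv n L).getD p 0 = ((L.idxOf (p : Int) : Nat) : Int) := by
  rw [List.getD_eq_getElem _ _ (by simp [pvInv, hp])]
  simp only [pvInv, List.getElem_map, List.getElem_range]

theorem pv_stepB_eq_inv_mv (values : List Int) {n : Nat} (hn : n = values.length) (h2 : 2 ≤ n)
    {L : List Int} (h : L.Perm (pvR n)) {p : Nat} (hp : p < n) :
    stepB values (pvInv n L) p =
      pvInv n (pvMv L (L.idxOf (p : Int)) (pvT values ((L.idxOf (p : Int) : Nat) : Int) p).toNat (p : Int)) := by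
  have hLlen := pv_perm_length h
  have hcval : PySem.List.pyGetD (pvInv n L) (p : Int) 0 = ((L.idxOf (p : Int) : Nat) : Int) := by
    rw [PySem.List.pyGetD_natCast]
    exact pv_inv_getD n L hp
  have hT := pvT_bounds values ((L.idxOf (p : Int) : Nat) : Int) p (hn ▸ h2)
  set c := L.idxOf (p : Int) with hcdef
  have hc : c < n := pv_idxOf_lt h hp
  set ti := pvT values ((c : Nat) : Int) p with htidef
  set tN := ti.toNat with htNdef
  have htN : (tN : Int) = ti := by omega
  have htle : tN ≤ n - 1 := by
    have : ti ≤ (values.length : Int) - 1 := hT.2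
    rw [← hn] at this
    omega
  have hself := pv_idxOf_mv_self h hp htle
  simp only [stepB, hcval]
  have hti' : PySem.Int.mod (((c : Nat) : Int) + PySem.List.pyGetD values (p : Int) 0 - 1) ((values.length : Int) - 1) + 1 = (tN : Int) := by
    rw [htN, htidef, pvT]
  rw [hti']
  apply List.ext_getElem
  · simp only [List.length_set]
    split_ifs <;> simp [pvInv]
  · intro q hq1 hq2
    have hqn : q < n := by
      simpa [pv_inv_length] using hq2
    rw [List.getElem_set]
    have hRHS : (pvInv n (pvMv L c tN (p : Int)))[q]'hq2 =
        (((pvMv L c tN (p : Int)).idxOf (q : Int) : Nat) : Int) := by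
      simp only [pvInv, List.getElem_map, List.getElem_range]
    rw [hRHS]
    by_cases hpq : p = q
    · rw [if_pos hpq, ← hpq, hself, htN]
    · rw [if_neg hpq]
      have hother := pv_idxOf_mv_other h hp htle hqn (fun hh => hpq (hh.symm))
      rw [hother]
      have hj : L.idxOf (q : Int) < n := pv_idxOf_lt h hqn
      set j := L.idxOf (q : Int) with hjdef
      clear_value tN ti c
      have hget : ∀ (f : Int → Int), ((pvInv n L).map f)[q]'(by simp [pvInv, hqn]) = f ((j : Nat) : Int) := by
        intro f
        simp only [pvInv, List.getElem_map, List.getElem_range]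
        rw [hjdef]
      have hgetInv : (pvInv n L)[q]'(by simp [pvInv, hqn]) = ((j : Nat) : Int) := by
        simp only [pvInv, List.getElem_map, List.getElem_range]
        rw [hjdef]
      split_ifs with hb1 hb2 <;> simp only [hget, hgetInv] <;> split_ifs <;> omega

theorem pv_inner (values : List Int) {n : Nat} (hn : n = values.length) (hne : n ≠ 1)
    (ps : List Nat) (hps : ∀ x ∈ ps, x < n) :
    ∀ L : List Int, L.Perm (pvR n) →
      (ps.foldl (fun (L : List Int) (k : Nat) => stepA values L ((k : Nat) : Int)) L).Perm (pvR n) ∧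
      ps.foldl (stepB values) (pvInv n L) = pvInv n (ps.foldl (fun (L : List Int) (k : Nat) => stepA values L ((k : Nat) : Int)) L) := by
  induction ps with
  | nil => intro L h; exact ⟨h, rfl⟩
  | cons p rest ih =>
    intro L h
    have hp : p < n := hps p (List.mem_cons_self)
    have h2 : 2 ≤ n := by omega
    have hT := pvT_bounds values ((L.idxOf (p : Int) : Nat) : Int) p (hn ▸ h2)
    have htle : (pvT values ((L.idxOf (p : Int) : Nat) : Int) p).toNat ≤ n - 1 := by
      have h1 := hT.1
      have h2' := hT.2
      rw [← hn] at h2'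
      omega
    have hstep := pv_stepA_eq_mv values hn h2 h hp
    have hperm' := pv_mv_perm h hp htle
    have hB := pv_stepB_eq_inv_mv values hn h2 h hp
    have hrest := ih (fun x hx => hps x (List.mem_cons_of_mem _ hx))
      (pvMv L (L.idxOf (p : Int)) (pvT values ((L.idxOf (p : Int) : Nat) : Int) p).toNat (p : Int)) hperm'
    constructor
    · simpa [List.foldl_cons, hstep] using hrest.1
    · simp only [List.foldl_cons, hstep, hB]
      exact hrest.2

theorem pv_innerA_pyRange (values : List Int) (L : List Int) :
    (PySem.List.pyRange 0 (values.length : Int) 1).foldl (stepA values) L =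
      (List.range values.length).foldl (fun (L : List Int) (k : Nat) => stepA values L ((k : Nat) : Int)) L := by
  rw [PySem.List.pyRange_one]
  simp [List.foldl_map]

theorem pv_rounds (values : List Int) {n : Nat} (hn : n = values.length) (hne : n ≠ 1)
    (rs : List Int) :
    ∀ L : List Int, L.Perm (pvR n) →
      (rs.foldl (fun L _ => (PySem.List.pyRange 0 (values.length : Int) 1).foldl (stepA values) L) L).Perm (pvR n) ∧
      rs.foldl (fun w _ => (List.range n).foldl (stepB values) w) (pvInv n L) =
        pvInv n (rs.foldl (fun L _ => (PySem.List.pyRange 0 (values.length : Int) 1).foldl (stepA values) L) L) := by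
  induction rs with
  | nil => intro L h; exact ⟨h, rfl⟩
  | cons r rest ih =>
    intro L h
    have hinner := pv_inner values hn hne (List.range n) (fun x hx => List.mem_range.mp hx) L h
    have hA : (PySem.List.pyRange 0 (values.length : Int) 1).foldl (stepA values) L =
        (List.range n).foldl (fun (L : List Int) (k : Nat) => stepA values L ((k : Nat) : Int)) L := by
      rw [pv_innerA_pyRange, hn]
    constructor
    · simp only [List.foldl_cons, hA]
      exact (ih _ hinner.1).1
    · simp only [List.foldl_cons, hA, hinner.2]
      exact (ih _ hinner.1).2

theorem pv_inv_R (n : Nat) : pvInv n (pvR n) = pvR n := by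
  apply List.ext_getElem
  · simp [pvInv, pvR_length]
  · intro q hq1 hq2
    have hqn : q < n := by simpa [pvR_length] using hq2
    have hval : (pvR n)[q]'hq2 = (q : Int) := pvR_getElem n q hq2
    have hidx : (pvR n).idxOf ((q : Nat) : Int) = q := by
      have h2 := (pvR_nodup n).idxOf_getElem q hq2
      rw [hval] at h2
      exact h2
    simp only [pvInv, List.getElem_map, List.getElem_range]
    rw [hidx, hval]

theorem pv_scatter_len (g : Nat → Nat) (v : Nat → Int) (ps : List Nat) (out : List Int) :
    (ps.foldl (fun (o : List Int) (p : Nat) => o.set (g p) (v p)) out).length = out.length := by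
  induction ps generalizing out with
  | nil => rfl
  | cons p rest ih => simp [List.foldl_cons, ih, List.length_set]

theorem pv_scatter_untouched (g : Nat → Nat) (v : Nat → Int) (ps : List Nat) (out : List Int)
    (i : Nat) (hg : ∀ p ∈ ps, g p ≠ i) :
    (ps.foldl (fun (o : List Int) (p : Nat) => o.set (g p) (v p)) out)[i]? = out[i]? := by
  induction ps generalizing out with
  | nil => rfl
  | cons p rest ih =>
    rw [List.foldl_cons, ih _ (fun x hx => hg x (List.mem_cons_of_mem _ hx))]
    exact List.getElem?_set_ne (hg p List.mem_cons_self)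

theorem pv_scatter_hit (g : Nat → Nat) (v : Nat → Int) (ps : List Nat) (out : List Int)
    (i : Nat) (hi : i < out.length) (p0 : Nat) (hp0 : p0 ∈ ps) (hg : g p0 = i)
    (huniq : ∀ p ∈ ps, g p = i → p = p0) (hnd : ps.Nodup) :
    (ps.foldl (fun (o : List Int) (p : Nat) => o.set (g p) (v p)) out)[i]? = some (v p0) := by
  induction ps generalizing out with
  | nil => cases hp0
  | cons p rest ih =>
    rw [List.foldl_cons]
    by_cases hpp : p = p0
    · subst hpp
      have hnotin : p ∉ rest := (List.nodup_cons.mp hnd).1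
      have hrest : ∀ x ∈ rest, g x ≠ i := by
        intro x hx hgx
        exact hnotin ((huniq x (List.mem_cons_of_mem _ hx) hgx) ▸ hx)
      rw [pv_scatter_untouched g v rest _ i hrest, hg]
      exact List.getElem?_set_self (by omega)
    · have hp0' : p0 ∈ rest := by
        rcases List.mem_cons.mp hp0 with hh | hh
        · exact absurd hh.symm hpp
        · exact hh
      exact ih _ (by simpa [List.length_set] using hi) hp0'
        (fun x hx hgx => huniq x (List.mem_cons_of_mem _ hx) hgx) (List.nodup_cons.mp hnd).2

theorem pv_final (values : List Int) {n : Nat} (hn : n = values.length)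
    {L : List Int} (h : L.Perm (pvR n)) :
    (List.range n).foldl
      (fun (out : List Int) (p : Nat) =>
        out.set (PySem.List.pyGetD (pvInv n L) ((p : Nat) : Int) 0).toNat
          (PySem.List.pyGetD values ((p : Nat) : Int) 0))
      (List.replicate n 0) = L.map (fun (x : Int) => PySem.List.pyGetD values x 0) := by
  have hLlen := pv_perm_length h
  have hbody : (List.range n).foldl
      (fun (out : List Int) (p : Nat) =>
        out.set (PySem.List.pyGetD (pvInv n L) ((p : Nat) : Int) 0).toNat
          (PySem.List.pyGetD values ((p : Nat) : Int) 0))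
      (List.replicate n 0) =
      (List.range n).foldl
      (fun (out : List Int) (p : Nat) =>
        out.set (L.idxOf ((p : Nat) : Int)) (PySem.List.pyGetD values ((p : Nat) : Int) 0))
      (List.replicate n 0) := by
    apply PySem.List.foldl_congr_mem
    intro acc x hx
    have hxn : x < n := List.mem_range.mp hx
    rw [PySem.List.pyGetD_natCast, pv_inv_getD n L hxn]
    simp
  rw [hbody]
  apply List.ext_getElem?
  intro i
  by_cases hi : i < n
  · have hq : L[i]'(by omega) ∈ L := List.getElem_mem _
    have hqb := (pv_perm_mem h _).mp hq
    have hqD : L.getD i 0 = L[i]'(by omega) := List.getD_eq_getElem L 0 (by omega)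
    have hcast : (((L[i]'(by omega)).toNat : Nat) : Int) = L[i]'(by omega) :=
      Int.toNat_of_nonneg hqb.1
    have hg : L.idxOf (((L[i]'(by omega)).toNat : Nat) : Int) = i := by
      rw [hcast]
      exact (pv_perm_nodup h).idxOf_getElem i (by omega)
    have hhit := pv_scatter_hit (fun p => L.idxOf ((p : Nat) : Int))
      (fun p => PySem.List.pyGetD values ((p : Nat) : Int) 0)
      (List.range n) (List.replicate n 0) i (by simp [hi])
      ((L[i]'(by omega)).toNat)
      (by rw [List.mem_range]; omega)
      hg
      ?uniq
      (List.nodup_range)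
    · rw [hhit]
      rw [List.getElem?_map, List.getElem?_eq_getElem (by omega)]
      simp only [Option.map_some]
      rw [hcast]
    case uniq =>
      intro x hx hgx
      have hxn : x < n := List.mem_range.mp hx
      have hxi : L.idxOf ((x : Nat) : Int) < L.length := by
        rw [hLlen]; exact pv_idxOf_lt h hxn
      have hgx' : L.idxOf ((x : Nat) : Int) = i := hgx
      have hD : L.getD (L.idxOf ((x : Nat) : Int)) 0 = ((x : Nat) : Int) := by
        rw [List.getD_eq_getElem L 0 hxi]
        exact List.getElem_idxOf hxi
      rw [hgx'] at hD
      rw [hqD] at hD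
      omega
  · rw [List.getElem?_eq_none, List.getElem?_eq_none]
    · simp [hLlen]; omega
    · rw [pv_scatter_len]; simp; omega


-- ===== VERDICT (by name: the statement is the Claim_ definition above) =====
theorem mixing_spec : Claim_equal_mixing := by
  intro values rounds _hdom hpre
  unfold Spec_mixing
  by_cases hne : values.length = 1
  · -- a singleton list is only admitted with rounds < 1: both loops are empty
    have hr : rounds < 1 := by
      by_contra hcon
      exact hpre ⟨hne, by omega⟩
    have hrs : PySem.List.pyRange 0 rounds 1 = [] := PySem.List.pyRange_one_eq_nil (by omega)
    simp only [mixing, mixing_alt, hrs, List.foldl_nil]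
    conv_rhs => rw [show PySem.List.pyRange 0 ((values.length : Nat) : Int) 1 = pvInv values.length (pvR values.length) from (pv_inv_R _).symm]
    exact (pv_final values rfl (List.Perm.refl _)).symm
  · obtain ⟨hperm, heq⟩ := pv_rounds values rfl hne (PySem.List.pyRange 0 rounds 1) (pvR values.length) (List.Perm.refl _)
    simp only [mixing, mixing_alt]
    conv_rhs => rw [show PySem.List.pyRange 0 ((values.length : Nat) : Int) 1 = pvInv values.length (pvR values.length) from (pv_inv_R _).symm]
    rw [heq]
    exact (pv_final values rfl hperm).symm
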